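-- pv_equiv track=rewrite | github.com/babi3031/my_practise | Practise/Coding/charactercountoccurence.py | char_count_occurence
-- ===== SOURCE A (Python) =====
-- def char_count_occurence(s):
--     char_count = {}
--     for char in s:
--         if char in char_count:
--             char_count[char]+=1
--         else:
--             char_count[char]=1
--     return dict(sorted(char_count.items()))
-- ===== SOURCE B (Python) =====
-- def char_count_occurence(s):
--     # Sort the characters first, then count runs of equal characters in one
--     # pass; the result dict is built already in sorted-key order.
--     srt = sorted(s)
--     if not srt:
--         return {}
--     items = []
--     cur, n = srt[0], 1
--     for ch in srt[1:]:
--         if ch == cur: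
--             n += 1
--         else:
--             items.append((cur, n))
--             cur, n = ch, 1
--     items.append((cur, n))
--     return dict(items)
-- ===== Notes on version B (the rewrite author's own statement) =====
-- stated objective: alternative
-- what changed: Instead of counting into a dict while scanning and then sorting the dict items, B sorts the characters first and counts runs of equal characters in a single grouping pass, so the result is emitted directly in sorted-key order with no final sort.
import Mathlib
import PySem

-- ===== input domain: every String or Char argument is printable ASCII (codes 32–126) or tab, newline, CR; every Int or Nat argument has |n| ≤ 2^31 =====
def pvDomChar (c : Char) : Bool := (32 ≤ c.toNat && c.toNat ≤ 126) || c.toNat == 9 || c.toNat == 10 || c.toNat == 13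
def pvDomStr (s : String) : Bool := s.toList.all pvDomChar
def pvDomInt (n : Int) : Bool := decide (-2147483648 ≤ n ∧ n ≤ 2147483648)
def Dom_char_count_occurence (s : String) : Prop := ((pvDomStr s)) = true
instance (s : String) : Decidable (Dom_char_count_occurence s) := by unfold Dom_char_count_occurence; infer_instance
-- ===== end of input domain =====

-- B sorts the characters first and counts runs of equal characters in one grouping pass
-- (result already in key order, no final sort), instead of A's dict counting + sort; alternative decomposition, same results.
-- Python's one-character strings (the dict keys) are represented as Char until the final
-- conversion to String on return; singleton strings compare exactly as their characters.


-- ===== PORT A =====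
-- for char in s: if char in char_count: char_count[char]+=1 else: char_count[char]=1
-- return dict(sorted(char_count.items()))   (tuples compare lexicographically: sorted2)
def char_count_occurence (s : String) : List (String × Int) :=
  let char_count : PySem.Dict Char Int :=
    s.toList.foldl (fun d c =>
      if d.contains c then d.insert c (d.getD c 0 + 1) else d.insert c 1)
      PySem.Dict.empty
  ((PySem.Dict.ofList
      (PySem.List.sorted2 char_count.items (fun p => p.1) (fun p => p.2))).items).map
    (fun p => (String.ofList [p.1], p.2))

-- ===== PORT B =====
-- srt = sorted(s); single pass with (items, cur, n) state counting runs; return dict(items)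
def char_count_occurence_alt (s : String) : List (String × Int) :=
  let srt := PySem.List.sorted s.toList (fun c => c)
  match srt with
  | [] => []
  | c0 :: rest =>
    let st := rest.foldl
      (fun (st : List (Char × Int) × Char × Int) ch =>
        if ch = st.2.1 then (st.1, (st.2.1, st.2.2 + 1))
        else (st.1 ++ [(st.2.1, st.2.2)], (ch, 1)))
      ([], (c0, 1))
    ((PySem.Dict.ofList (st.1 ++ [st.2])).items).map (fun p => (String.ofList [p.1], p.2))

-- ===== PRECONDITION & SPEC =====
def Spec_char_count_occurence (s : String) (out : List (String × Int)) : Prop := out = char_count_occurence_alt s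
instance (s : String) (out : List (String × Int)) : Decidable (Spec_char_count_occurence s out) := by unfold Spec_char_count_occurence; infer_instance

-- ===== CLAIM (what is proved, stated in full; the proofs are below) =====
def Claim_equal_char_count_occurence : Prop := ∀ (s : String), Dom_char_count_occurence s → Spec_char_count_occurence s (char_count_occurence s)

-- ===== LEMMAS AND PROOFS =====

-- run-grouping of B's fold, as a structural recursion (proof helper)
def gorun : List Char → Char → Int → List (Char × Int)
  | [], c, n => [(c, n)]
  | x :: xs, c, n => if x = c then gorun xs c (n + 1) else (c, n) :: gorun xs x 1

-- B's fold with state (items, cur, n) computes acc ++ gorun xs c n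
lemma foldl_eq_gorun (xs : List Char) : ∀ (acc : List (Char × Int)) (c : Char) (n : Int),
    (xs.foldl
      (fun (st : List (Char × Int) × Char × Int) ch =>
        if ch = st.2.1 then (st.1, (st.2.1, st.2.2 + 1))
        else (st.1 ++ [(st.2.1, st.2.2)], (ch, 1)))
      (acc, (c, n))).1 ++
    [(xs.foldl
      (fun (st : List (Char × Int) × Char × Int) ch =>
        if ch = st.2.1 then (st.1, (st.2.1, st.2.2 + 1))
        else (st.1 ++ [(st.2.1, st.2.2)], (ch, 1)))
      (acc, (c, n))).2] = acc ++ gorun xs c n := by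
  induction xs with
  | nil => intro acc c n; simp [gorun]
  | cons x xs ih =>
    intro acc c n
    by_cases h : x = c
    · simp [List.foldl_cons, h, gorun, ih]
    · simp [List.foldl_cons, h, gorun, ih]

-- invariant of gorun on a sorted run: heads ≥ c, strictly increasing, head set = {c} ∪ xs,
-- and every emitted count is the run length
lemma gorun_spec (xs : List Char) : ∀ (c : Char) (n : Int),
    (c :: xs).Pairwise (· ≤ ·) →
    (∀ p ∈ gorun xs c n, c ≤ p.1)
    ∧ (gorun xs c n).Pairwise (fun p q => p.1 < q.1)
    ∧ (∀ a, a ∈ (gorun xs c n).map Prod.fst ↔ (a = c ∨ a ∈ xs))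
    ∧ (∀ p ∈ gorun xs c n,
        p.2 = if p.1 = c then n + (xs.count c : Int) else (xs.count p.1 : Int)) := by
  induction xs with
  | nil =>
    intro c n _
    refine ⟨by simp [gorun], by simp [gorun], by simp [gorun], ?_⟩
    intro p hp
    simp [gorun] at hp
    simp [hp]
  | cons x xs ih =>
    intro c n h
    rw [List.pairwise_cons] at h
    obtain ⟨hc, hx⟩ := h
    have hxle : ∀ a ∈ xs, x ≤ a := (List.pairwise_cons.mp hx).1
    have hxs : xs.Pairwise (· ≤ ·) := (List.pairwise_cons.mp hx).2
    by_cases hxc : x = c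
    · subst hxc
      have hg : gorun (x :: xs) x n = gorun xs x (n + 1) := by simp [gorun]
      obtain ⟨h1, h2, h3, h4⟩ := ih x (n + 1) hx
      refine ⟨?_, ?_, ?_, ?_⟩ <;> rw [hg]
      · exact h1
      · exact h2
      · intro a; rw [h3 a]; simp only [List.mem_cons]; tauto
      · intro p hp
        have hv := h4 p hp
        by_cases hpc : p.1 = x
        · rw [if_pos hpc] at hv ⊢
          rw [hv, List.count_cons_self]
          push_cast; ring
        · rw [if_neg hpc] at hv ⊢
          rw [hv, List.count_cons_of_ne (fun hh => hpc hh.symm)]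
    · have hg : gorun (x :: xs) x n = gorun xs x (n + 1) := by simp [gorun]
      have hg' : gorun (x :: xs) c n = (c, n) :: gorun xs x 1 := by simp [gorun, hxc]
      obtain ⟨h1, h2, h3, h4⟩ := ih x 1 hx
      have hcx : c < x := lt_of_le_of_ne (hc x (by simp)) (fun hh => hxc hh.symm)
      have hnot : c ∉ x :: xs := by
        intro hmem
        rcases List.mem_cons.mp hmem with hh | hh
        · exact hxc hh.symm
        · exact absurd (hxle c hh) (not_le.mpr hcx)
      refine ⟨?_, ?_, ?_, ?_⟩ <;> rw [hg']
      · intro p hp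
        rcases List.mem_cons.mp hp with hh | hh
        · simp [hh]
        · exact le_of_lt (lt_of_lt_of_le hcx (h1 p hh))
      · exact List.pairwise_cons.mpr
          ⟨fun q hq => lt_of_lt_of_le hcx (h1 q hq), h2⟩
      · intro a
        simp only [List.map_cons, List.mem_cons]
        rw [h3 a]
      · intro p hp
        rcases List.mem_cons.mp hp with hph | hpt
        · rw [hph]
          rw [if_pos rfl, List.count_eq_zero.mpr hnot]
          simp
        · have hgt : c < p.1 := lt_of_lt_of_le hcx (h1 p hpt)
          have hne : p.1 ≠ c := ne_of_gt hgt
          have hv := h4 p hpt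
          rw [if_neg hne]
          by_cases hpx : p.1 = x
          · rw [if_pos hpx] at hv
            rw [hv, hpx, List.count_cons_self]
            push_cast; ring
          · rw [if_neg hpx] at hv
            rw [hv, List.count_cons_of_ne (fun hh => hpx hh.symm)]

-- pairs whose second component is determined by the first
lemma map_fst_pair (g : Char → Int) : ∀ (ps : List (Char × Int)),
    (∀ p ∈ ps, p.2 = g p.1) → ps.map (fun p => (p.1, g p.1)) = ps := by
  intro ps h
  induction ps with
  | nil => rfl
  | cons p ps ih =>
    have hp := h p (by simp)
    simp only [List.map_cons]
    rw [ih (fun q hq => h q (by simp [hq]))]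
    cases p with
    | mk a b => simp at hp; simp [hp]

-- inserting a mapped element into a mapped list
lemma insertBy_map (f : Char → Char × Int) (bf : Char × Int → Char × Int → Bool)
    (x : Char) : ∀ (acc : List Char),
    PySem.List.insertBy bf (f x) (acc.map f) =
      (PySem.List.insertBy (fun a b => bf (f a) (f b)) x acc).map f := by
  intro acc
  induction acc with
  | nil => simp [PySem.List.insertBy]
  | cons y ys ih =>
    simp only [List.map_cons, PySem.List.insertBy]
    by_cases h : bf (f x) (f y) = true
    · simp [h]
    · simp [h, ih]

-- sorted2 over pairs (k, g k): the tuple comparison reduces to the key comparison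
lemma sorted2_map_pair (g : Char → Int) (ks : List Char) :
    PySem.List.sorted2 (ks.map (fun k => (k, g k))) (fun p => p.1) (fun p => p.2) =
      (PySem.List.sorted ks (fun c => c)).map (fun k => (k, g k)) := by
  have hbf : (fun (a b : Char) =>
      (fun (p q : Char × Int) =>
        decide (p.1 < q.1) || (!decide (q.1 < p.1) && decide (p.2 < q.2)))
        ((fun k => (k, g k)) a) ((fun k => (k, g k)) b)) =
      (fun (a b : Char) => decide (a < b)) := by
    funext a b
    rcases lt_trichotomy a b with h | h | h
    · simp [h]
    · subst h; simp
    · simp [h, not_lt_of_gt h]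
  have key : ∀ (l : List Char) (acc : List Char),
      l.foldl (fun a k => PySem.List.insertBy
          (fun (p q : Char × Int) =>
            decide (p.1 < q.1) || (!decide (q.1 < p.1) && decide (p.2 < q.2)))
          ((fun k => (k, g k)) k) a)
        (acc.map (fun k => (k, g k))) =
      (l.foldl (fun a k =>
          PySem.List.insertBy (fun (x y : Char) => decide (x < y)) k a) acc).map
        (fun k => (k, g k)) := by
    intro l
    induction l with
    | nil => intro acc; rfl
    | cons k l ih =>
      intro acc
      rw [List.foldl_cons, List.foldl_cons,
        insertBy_map (fun k => (k, g k)) _ k acc, hbf, ih]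
  have hs := PySem.List.sorted_eq_foldl_insertBy ks (fun c => c)
  calc PySem.List.sorted2 (ks.map (fun k => (k, g k))) (fun p => p.1) (fun p => p.2)
      = (ks.map (fun k => (k, g k))).foldl (fun a p => PySem.List.insertBy
          (fun (p q : Char × Int) =>
            decide (p.1 < q.1) || (!decide (q.1 < p.1) && decide (p.2 < q.2))) p a) [] := rfl
    _ = ks.foldl (fun a k => PySem.List.insertBy
          (fun (p q : Char × Int) =>
            decide (p.1 < q.1) || (!decide (q.1 < p.1) && decide (p.2 < q.2)))
          ((fun k => (k, g k)) k) a) (([] : List Char).map (fun k => (k, g k))) := by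
        rw [List.foldl_map]; rfl
    _ = (ks.foldl (fun a k =>
          PySem.List.insertBy (fun (x y : Char) => decide (x < y)) k a) []).map
          (fun k => (k, g k)) := key ks []
    _ = (PySem.List.sorted ks (fun c => c)).map (fun k => (k, g k)) := by rw [hs]

-- ===== VERDICT (by name: the statement is the Claim_ definition above) =====
theorem char_count_occurence_spec : Claim_equal_char_count_occurence := by
  intro s _
  show char_count_occurence s = char_count_occurence_alt s
  have hcntfun : (fun (d : PySem.Dict Char Int) c =>
      if d.contains c then d.insert c (d.getD c 0 + 1) else d.insert c 1) =
      (fun (d : PySem.Dict Char Int) c => d.insert c (d.getD c 0 + 1)) := by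
    funext d c
    by_cases h : d.contains c = true
    · rw [if_pos h]
    · rw [if_neg h,
        PySem.Dict.getD_of_not_contains d 0 (by simpa using h)]
      norm_num
  have hA : char_count_occurence s =
      ((PySem.Dict.ofList (PySem.List.sorted2
          ((PySem.Set.ofList s.toList).map
            (fun k => (k, (List.count k s.toList : Int))))
          (fun p => p.1) (fun p => p.2))).items).map
        (fun p => (String.ofList [p.1], p.2)) := by
    simp only [char_count_occurence, hcntfun,
      PySem.Dict.foldl_insert_getD_add_one_eq_counter, PySem.Dict.items_counter]
  cases hys : PySem.List.sorted s.toList (fun c => c) with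
  | nil =>
    have hl0 : s.toList = [] := (PySem.List.sorted_eq_nil_iff _ _ _).mp hys
    rw [hA]
    simp only [char_count_occurence_alt, hl0]
    rfl
  | cons c0 rest =>
    have hpw : (c0 :: rest).Pairwise (· ≤ ·) := by
      have h := PySem.List.sorted_pairwise s.toList (fun c => c)
      rw [hys] at h; exact h
    obtain ⟨h1, h2, h3, h4⟩ := gorun_spec rest c0 1 hpw
    have hperm : (c0 :: rest).Perm s.toList := by
      have h := PySem.List.sorted_perm s.toList (fun c => c) false
      rw [hys] at h; exact h
    have hks_pw : ((gorun rest c0 1).map Prod.fst).Pairwise (· < ·) :=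
      List.pairwise_map.mpr h2
    have hnodup : ((gorun rest c0 1).map Prod.fst).Nodup :=
      hks_pw.imp (fun h => ne_of_lt h)
    have hmem : ∀ a, a ∈ (gorun rest c0 1).map Prod.fst ↔ a ∈ PySem.Set.ofList s.toList := by
      intro a
      rw [h3 a, PySem.Set.mem_ofList]
      constructor
      · intro h
        exact hperm.mem_iff.mp (List.mem_cons.mpr h)
      · intro h
        exact List.mem_cons.mp (hperm.mem_iff.mpr h)
    have hksperm : ((gorun rest c0 1).map Prod.fst).Perm (PySem.Set.ofList s.toList) :=
      (List.perm_ext_iff_of_nodup hnodup (PySem.Set.nodup_ofList _)).mpr hmem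
    have hsorted_eq : PySem.List.sorted (PySem.Set.ofList s.toList) (fun c => c) =
        (gorun rest c0 1).map Prod.fst :=
      PySem.List.sorted_eq_of_perm_of_pairwise_lt _ _ _ hksperm hks_pw
    -- every pair of the run list carries the count of its character in s
    have hvals : ∀ p ∈ gorun rest c0 1, p.2 = (List.count p.1 s.toList : Int) := by
      intro p hp
      have hv := h4 p hp
      have hcount : List.count p.1 s.toList = List.count p.1 (c0 :: rest) :=
        (hperm.count_eq p.1).symm
      by_cases hpc : p.1 = c0
      · rw [if_pos hpc] at hv
        rw [hv, hcount, hpc, List.count_cons_self]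
        push_cast; ring
      · rw [if_neg hpc] at hv
        rw [hv, hcount, List.count_cons_of_ne (fun hh => hpc hh.symm)]
    have hmaps : ((gorun rest c0 1).map Prod.fst).map
        (fun k => (k, (List.count k s.toList : Int))) = gorun rest c0 1 := by
      rw [List.map_map]
      exact map_fst_pair (fun k => (List.count k s.toList : Int)) _ hvals
    have hB : char_count_occurence_alt s =
        ((PySem.Dict.ofList (gorun rest c0 1)).items).map
          (fun p => (String.ofList [p.1], p.2)) := by
      simp only [char_count_occurence_alt, hys]
      rw [foldl_eq_gorun rest [] c0 1]
      rfl
    rw [hA, hB, sorted2_map_pair, hsorted_eq, hmaps]
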